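-- pv_equiv track=rewrite | github.com/tfcp68/manual-projects | Исходники/Глава 2. Часть 1/Динамическое программирование1/Динамическое программирование1/Табличный метод/21. Зоомагазин/Python/petshop_array.py | petshop_array_forward
-- ===== SOURCE A (Python) =====
-- def petshop_array_forward(n):
--     if n < 0:
--         return -1
--     if n == 0:
--         return 0
--     if n < 3:
--         return 2**(n)
--     a = [0] * (n + 3)
--     for i in range(1, n):
--         a[i + 2] = a[i + 1] + 2 ** (i - 1)
--     answer = 2 ** n - a[n]
--     return answer
-- ===== SOURCE B (Python) =====
-- def petshop_array_forward(n):
--     # Closed form: the DP table satisfies a[n] = 2**(n-2) - 1 for n >= 3,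
--     # so the answer is 2**n - 2**(n-2) + 1, computed without building the table.
--     if n < 0:
--         return -1
--     if n == 0:
--         return 0
--     if n < 3:
--         return 2 ** n
--     return 2 ** n - 2 ** (n - 2) + 1
-- ===== Notes on version B (the rewrite author's own statement) =====
-- stated objective: faster
-- what changed: Replaces the O(n) DP table (running sum of powers of two) with the closed form 2^n - 2^(n-2) + 1 for n >= 3.
import Mathlib
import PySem

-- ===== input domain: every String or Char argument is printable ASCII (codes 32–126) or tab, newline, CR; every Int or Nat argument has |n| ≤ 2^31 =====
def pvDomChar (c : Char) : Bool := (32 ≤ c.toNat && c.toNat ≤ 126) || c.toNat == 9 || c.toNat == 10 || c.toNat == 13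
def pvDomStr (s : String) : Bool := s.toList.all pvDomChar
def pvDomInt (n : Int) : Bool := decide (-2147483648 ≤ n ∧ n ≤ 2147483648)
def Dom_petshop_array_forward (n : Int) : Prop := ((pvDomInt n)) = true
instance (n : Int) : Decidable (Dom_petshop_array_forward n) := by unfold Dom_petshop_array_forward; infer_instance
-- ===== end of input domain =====

-- B replaces A's O(n) DP table by the closed form 2^n - 2^(n-2) + 1 (objective: faster).

-- ===== PORT A =====
-- literal port of the DP: build the table a of length n+3, fill a[i+2] = a[i+1] + 2^(i-1)
-- for i in range(1, n), return 2^n - a[n]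
def petshop_array_forward (n : Int) : Int :=
  if n < 0 then -1
  else if n = 0 then 0
  else if n < 3 then 2 ^ n.toNat
  else
    let a0 : List Int := List.replicate (n + 3).toNat 0
    let a := (PySem.List.pyRange 1 n 1).foldl
      (fun a i => PySem.List.pySetD a (i + 2)
        (PySem.List.pyGetD a (i + 1) 0 + 2 ^ (i - 1).toNat)) a0
    2 ^ n.toNat - PySem.List.pyGetD a n 0

-- ===== PORT B =====
def petshop_array_forward_alt (n : Int) : Int :=
  if n < 0 then -1
  else if n = 0 then 0
  else if n < 3 then 2 ^ n.toNat
  else 2 ^ n.toNat - 2 ^ (n - 2).toNat + 1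

-- ===== PRECONDITION & SPEC =====
def Spec_petshop_array_forward (n : Int) (out : Int) : Prop := out = petshop_array_forward_alt n
instance (n : Int) (out : Int) : Decidable (Spec_petshop_array_forward n out) := by unfold Spec_petshop_array_forward; infer_instance

-- ===== CLAIM (what is proved, stated in full; the proofs are below) =====
def Claim_equal_petshop_array_forward : Prop := ∀ (n : Int), Dom_petshop_array_forward n → Spec_petshop_array_forward n (petshop_array_forward n)

-- ===== LEMMAS AND PROOFS =====

-- invariant of A's loop: after processing i = 1..k the table holds 2^(j-2)-1 at 3 ≤ j ≤ k+2, 0 elsewhere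
theorem petshop_loop_inv (M : Nat) (k : Nat) (hk : k + 4 ≤ M) :
    ((PySem.List.pyRange 1 (1 + (k : Int)) 1).foldl
      (fun a i => PySem.List.pySetD a (i + 2)
        (PySem.List.pyGetD a (i + 1) 0 + 2 ^ (i - 1).toNat))
      (List.replicate M (0:Int))).length = M ∧
    ∀ j : Nat, ((PySem.List.pyRange 1 (1 + (k : Int)) 1).foldl
      (fun a i => PySem.List.pySetD a (i + 2)
        (PySem.List.pyGetD a (i + 1) 0 + 2 ^ (i - 1).toNat))
      (List.replicate M (0:Int))).getD j 0 =
      if 3 ≤ j ∧ j ≤ k + 2 then 2 ^ (j - 2) - 1 else 0 := by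
  induction k with
  | zero =>
      rw [PySem.List.pyRange_one_eq_nil (by omega)]
      simp only [List.foldl_nil, List.length_replicate, true_and]
      intro j
      rw [if_neg (by omega)]
      simp [List.getD]
  | succ k ih =>
      have ih := ih (by omega)
      have hsplit : PySem.List.pyRange 1 (1 + ((k+1 : Nat) : Int)) 1
          = PySem.List.pyRange 1 (1 + (k : Int)) 1 ++ [1 + (k : Int)] := by
        have : (1 + ((k+1 : Nat) : Int)) = (1 + (k : Int)) + 1 := by push_cast; ring
        rw [this, PySem.List.pyRange_one_succ_right (by omega)]
      rw [hsplit, List.foldl_append]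
      set L := (PySem.List.pyRange 1 (1 + (k : Int)) 1).foldl
        (fun a i => PySem.List.pySetD a (i + 2)
          (PySem.List.pyGetD a (i + 1) 0 + 2 ^ (i - 1).toNat))
        (List.replicate M (0:Int)) with hL
      obtain ⟨hlen, hval⟩ := ih
      simp only [List.foldl_cons, List.foldl_nil]
      have e1 : (1 + (k : Int)) + 2 = ((k + 3 : Nat) : Int) := by push_cast; ring
      have e2 : (1 + (k : Int)) + 1 = ((k + 2 : Nat) : Int) := by push_cast; ring
      have e3 : ((1 + (k : Int)) - 1).toNat = k := by omega
      rw [e1, e2, e3, PySem.List.pySetD_natCast, PySem.List.pyGetD_natCast]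
      have hlen' : (L.set (k + 3) (L.getD (k + 2) 0 + 2 ^ k)).length = M := by
        simp [hlen]
      refine ⟨hlen', ?_⟩
      intro j
      have hget : ∀ m : Nat, (L.set (k + 3) (L.getD (k + 2) 0 + 2 ^ k)).getD m 0
          = if m = k + 3 then L.getD (k + 2) 0 + 2 ^ k else L.getD m 0 := by
        intro m
        by_cases hm : m = k + 3
        · subst hm
          rw [if_pos rfl]
          have hlt : k + 3 < L.length := by omega
          rw [List.getD_eq_getElem _ _ (by simpa using hlt)]
          simp
        · rw [if_neg hm]
          by_cases hmlt : m < M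
          · rw [List.getD_eq_getElem _ _ (by omega : m < (L.set (k+3) _).length),
              List.getD_eq_getElem _ _ (by omega : m < L.length)]
            simp only [List.getElem_set]
            rw [if_neg (by omega)]
          · rw [List.getD_eq_default _ _ (by omega), List.getD_eq_default _ _ (by omega)]
      rw [hget j]
      by_cases hj : j = k + 3
      · subst hj
        rw [if_pos rfl, if_pos (by omega), hval (k + 2)]
        by_cases hk0 : k = 0
        · subst hk0; norm_num
        · rw [if_pos (by omega)]
          have : k + 2 - 2 = k := by omega
          have h2 : k + 3 - 2 = k + 1 := by omega
          rw [this, h2, pow_succ]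
          ring
      · rw [if_neg hj, hval j]
        by_cases hin : 3 ≤ j ∧ j ≤ k + 2
        · rw [if_pos hin, if_pos (by omega)]
        · rw [if_neg hin, if_neg (by omega)]

-- ===== VERDICT (by name: the statement is the Claim_ definition above) =====
theorem petshop_array_forward_spec : Claim_equal_petshop_array_forward := by
  intro n _
  unfold Spec_petshop_array_forward petshop_array_forward petshop_array_forward_alt
  by_cases h1 : n < 0
  · simp [h1]
  by_cases h2 : n = 0
  · simp [h2]
  by_cases h3 : n < 3
  · simp [h1, h2, h3]
  · simp only [if_neg h1, if_neg h2, if_neg h3]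
    have hn3 : 3 ≤ n := by omega
    set N : Nat := n.toNat with hN
    have hNn : (N : Int) = n := Int.toNat_of_nonneg (by omega)
    have hN3 : 3 ≤ N := by omega
    have hrange : (1 : Int) + ((N - 1 : Nat) : Int) = n := by omega
    have key := petshop_loop_inv (n + 3).toNat (N - 1) (by omega)
    rw [hrange] at key
    obtain ⟨hlen, hval⟩ := key
    set X := (PySem.List.pyRange 1 n 1).foldl
          (fun a i => PySem.List.pySetD a (i + 2)
            (PySem.List.pyGetD a (i + 1) 0 + 2 ^ (i - 1).toNat))
          (List.replicate (n + 3).toNat (0:Int)) with hX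
    have hNlt : N < X.length := by rw [hlen]; omega
    have hread : PySem.List.pyGetD X n 0 = 2 ^ (N - 2) - 1 := by
      rw [PySem.List.pyGetD_eq_getElem X 0 (by omega) (by rw [hlen]; omega)]
      have hv := hval N
      rw [if_pos (by omega), List.getD_eq_getElem _ _ hNlt] at hv
      exact hv
    rw [hread]
    have : (n - 2).toNat = N - 2 := by omega
    rw [this]
    ring
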